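-- pv_equiv track=rewrite | github.com/rileymiranda7/Sudoku-Solvers | IterativeSolverMain.py | getNumInSquare
-- ===== SOURCE A (Python) =====
-- def getNumInSquare(currBoard, i, j):
--     numInSquare = []
--     #each if elif block represents the square we could be in from 1 (top left corner) to 9 (bottom right corner)
--     if 0 <= i <= 2 and 0 <= j <= 2: # square 1 (upper left corner)
--         numInSquare += currBoard[0][0:3]
--         numInSquare = numInSquare + currBoard[1][0:3]
--         numInSquare += currBoard[2][0:3]
--     elif 0 <= i <= 2 and 3 <= j <= 5: # square 2 (upper middle)
--         numInSquare += currBoard[0][3:6]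
--         numInSquare = numInSquare + currBoard[1][3:6]
--         numInSquare += currBoard[2][3:6]
--     elif 0 <= i <= 2 and 6 <= j <= 8: # square 3 (upper right corner)
--         numInSquare += currBoard[0][6:9]
--         numInSquare = numInSquare + currBoard[1][6:9]
--         numInSquare += currBoard[2][6:9]
--     # row 2
--     elif 3 <= i <= 5 and 0 <= j <= 2: # square 4 (left middle row)
--         numInSquare += currBoard[3][0:3]
--         numInSquare = numInSquare + currBoard[4][0:3]
--         numInSquare += currBoard[5][0:3]
--     elif 3 <= i <= 5 and 3 <= j <= 5: # square 5 (middle middle row)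
--         numInSquare += currBoard[3][3:6]
--         numInSquare = numInSquare + currBoard[4][3:6]
--         numInSquare += currBoard[5][3:6]
--     elif 3 <= i <= 5 and 6 <= j <= 8: # square 6 (right middle row)
--         numInSquare += currBoard[3][6:9]
--         numInSquare = numInSquare + currBoard[4][6:9]
--         numInSquare += currBoard[5][6:9]
--     # row 3
--     elif 6 <= i <= 8 and 0 <= j <= 2: # square 7 (bottom left corner)
--         numInSquare += currBoard[6][0:3]
--         numInSquare = numInSquare + currBoard[7][0:3]
--         numInSquare += currBoard[8][0:3]
--     elif 6 <= i <= 8 and 3 <= j <= 5: # square 8 (middle bottom row)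
--         numInSquare += currBoard[6][3:6]
--         numInSquare = numInSquare + currBoard[7][3:6]
--         numInSquare += currBoard[8][3:6]
--     elif 6 <= i <= 8 and 6 <= j <= 8: # square 9 (bottom right corner)
--         numInSquare += currBoard[6][6:9]
--         numInSquare = numInSquare + currBoard[7][6:9]
--         numInSquare += currBoard[8][6:9]
--
--
--     # clears zeros
--     atLastEle = False
--     k = 0
--     while (not(atLastEle)):
--         if k > (len(numInSquare) - 1):
--             break
--             atLastEle = True
--         if numInSquare[k] == 0:
--             del numInSquare[k]
--             k -= 1
--         k += 1
--     return numInSquare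
-- ===== SOURCE B (Python) =====
-- def getNumInSquare(currBoard, i, j):
--     if not (0 <= i <= 8 and 0 <= j <= 8):
--         return []
--     bi, bj = 3 * (i // 3), 3 * (j // 3)
--     return [v for r in range(bi, bi + 3) for v in currBoard[r][bj:bj + 3] if v != 0]
-- ===== Notes on version B (the rewrite author's own statement) =====
-- stated objective: simpler
-- what changed: Replaces the nine hand-written box branches and the index-juggling del-while zero-clearing loop by an arithmetic box origin (3*(i//3), 3*(j//3)) and one comprehension that slices and filters in a single pass.
import Mathlib
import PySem

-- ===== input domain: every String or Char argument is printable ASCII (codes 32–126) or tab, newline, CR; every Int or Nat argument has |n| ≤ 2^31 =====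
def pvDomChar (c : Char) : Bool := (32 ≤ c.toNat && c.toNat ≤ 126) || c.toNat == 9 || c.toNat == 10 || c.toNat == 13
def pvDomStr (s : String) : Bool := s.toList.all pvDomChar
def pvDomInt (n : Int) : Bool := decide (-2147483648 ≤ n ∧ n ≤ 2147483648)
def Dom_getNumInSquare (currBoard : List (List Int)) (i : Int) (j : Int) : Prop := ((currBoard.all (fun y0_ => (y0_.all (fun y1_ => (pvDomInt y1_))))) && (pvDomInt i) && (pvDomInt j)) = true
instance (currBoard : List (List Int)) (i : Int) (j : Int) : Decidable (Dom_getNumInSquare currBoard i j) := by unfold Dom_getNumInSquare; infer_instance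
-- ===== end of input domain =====

-- B replaces A's nine box branches and manual del-loop by an arithmetic box origin and one
-- slicing/filtering comprehension (objective: simpler). Equivalence is on the return value.

-- ===== PORT A =====
-- currBoard[r][a:b] : row fetch (raises outside Pre_; getD [] there) then slice
def pvRowSlice (currBoard : List (List Int)) (r a b : Int) : List Int :=
  PySem.List.slice ((PySem.List.pyGet? currBoard r).getD []) (some a) (some b)

-- the trailing while-loop of A: del zeros in place, index k
def pvClearZeros (l : List Int) (k : Nat) : List Int :=
  if h : l.length ≤ k then l
  else if l.getD k 0 = 0 then pvClearZeros (l.eraseIdx k) k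
  else pvClearZeros l (k + 1)
termination_by l.length - k
decreasing_by
  · have hk : k < l.length := by omega
    simp only [List.length_eraseIdx, if_pos hk]; omega
  · omega

def getNumInSquare (currBoard : List (List Int)) (i : Int) (j : Int) : List Int :=
  pvClearZeros
    (if 0 ≤ i ∧ i ≤ 2 ∧ 0 ≤ j ∧ j ≤ 2 then
      pvRowSlice currBoard 0 0 3 ++ pvRowSlice currBoard 1 0 3 ++ pvRowSlice currBoard 2 0 3
    else if 0 ≤ i ∧ i ≤ 2 ∧ 3 ≤ j ∧ j ≤ 5 then
      pvRowSlice currBoard 0 3 6 ++ pvRowSlice currBoard 1 3 6 ++ pvRowSlice currBoard 2 3 6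
    else if 0 ≤ i ∧ i ≤ 2 ∧ 6 ≤ j ∧ j ≤ 8 then
      pvRowSlice currBoard 0 6 9 ++ pvRowSlice currBoard 1 6 9 ++ pvRowSlice currBoard 2 6 9
    else if 3 ≤ i ∧ i ≤ 5 ∧ 0 ≤ j ∧ j ≤ 2 then
      pvRowSlice currBoard 3 0 3 ++ pvRowSlice currBoard 4 0 3 ++ pvRowSlice currBoard 5 0 3
    else if 3 ≤ i ∧ i ≤ 5 ∧ 3 ≤ j ∧ j ≤ 5 then
      pvRowSlice currBoard 3 3 6 ++ pvRowSlice currBoard 4 3 6 ++ pvRowSlice currBoard 5 3 6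
    else if 3 ≤ i ∧ i ≤ 5 ∧ 6 ≤ j ∧ j ≤ 8 then
      pvRowSlice currBoard 3 6 9 ++ pvRowSlice currBoard 4 6 9 ++ pvRowSlice currBoard 5 6 9
    else if 6 ≤ i ∧ i ≤ 8 ∧ 0 ≤ j ∧ j ≤ 2 then
      pvRowSlice currBoard 6 0 3 ++ pvRowSlice currBoard 7 0 3 ++ pvRowSlice currBoard 8 0 3
    else if 6 ≤ i ∧ i ≤ 8 ∧ 3 ≤ j ∧ j ≤ 5 then
      pvRowSlice currBoard 6 3 6 ++ pvRowSlice currBoard 7 3 6 ++ pvRowSlice currBoard 8 3 6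
    else if 6 ≤ i ∧ i ≤ 8 ∧ 6 ≤ j ∧ j ≤ 8 then
      pvRowSlice currBoard 6 6 9 ++ pvRowSlice currBoard 7 6 9 ++ pvRowSlice currBoard 8 6 9
    else [])
    0

-- ===== PORT B =====
def getNumInSquare_alt (currBoard : List (List Int)) (i : Int) (j : Int) : List Int :=
  if 0 ≤ i ∧ i ≤ 8 ∧ 0 ≤ j ∧ j ≤ 8 then
    -- bi = 3*(i//3), bj = 3*(j//3); one comprehension over the box, row-major
    (PySem.List.pyRange (3 * PySem.Int.floordiv i 3) (3 * PySem.Int.floordiv i 3 + 3) 1).flatMap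
      (fun r =>
        (PySem.List.slice ((PySem.List.pyGet? currBoard r).getD [])
            (some (3 * PySem.Int.floordiv j 3)) (some (3 * PySem.Int.floordiv j 3 + 3))).filter
          (fun v => v != 0))
  else []

-- ===== PRECONDITION & SPEC =====
-- Pre_ excludes exactly the inputs where A raises IndexError: i,j name a box whose three row
-- indices do not all exist in currBoard (B raises there too).
def Pre_getNumInSquare (currBoard : List (List Int)) (i : Int) (j : Int) : Prop :=
  (0 ≤ i ∧ i ≤ 8 ∧ 0 ≤ j ∧ j ≤ 8) → 3 * PySem.Int.floordiv i 3 + 3 ≤ (currBoard.length : Int)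
instance (currBoard : List (List Int)) (i : Int) (j : Int) : Decidable (Pre_getNumInSquare currBoard i j) := by unfold Pre_getNumInSquare; infer_instance
def pvWitness_getNumInSquare : List (List Int) × Int × Int :=
  ([[1,0,2],[0,3,0],[4,0,0]], 1, 2)
def Spec_getNumInSquare (currBoard : List (List Int)) (i : Int) (j : Int) (out : List Int) : Prop := out = getNumInSquare_alt currBoard i j
instance (currBoard : List (List Int)) (i : Int) (j : Int) (out : List Int) : Decidable (Spec_getNumInSquare currBoard i j out) := by unfold Spec_getNumInSquare; infer_instance

-- ===== CLAIM (what is proved, stated in full; the proofs are below) =====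
def Claim_equal_getNumInSquare : Prop := ∀ (currBoard : List (List Int)) (i : Int) (j : Int), Dom_getNumInSquare currBoard i j → Pre_getNumInSquare currBoard i j → Spec_getNumInSquare currBoard i j (getNumInSquare currBoard i j)

-- ===== LEMMAS AND PROOFS =====

-- A's while loop from position k keeps the prefix and filters zeros out of the rest
theorem pvClearZeros_eq (l : List Int) (k : Nat) :
    pvClearZeros l k = l.take k ++ (l.drop k).filter (fun v => v != 0) := by
  by_cases h : l.length <= k
  · rw [pvClearZeros]
    simp [h, List.drop_eq_nil_of_le h, List.take_of_length_le h]
  · replace h : k < l.length := by omega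
    have hd : l.drop k = l[k] :: l.drop (k + 1) := List.drop_eq_getElem_cons h
    rw [pvClearZeros, dif_neg (by omega : ¬ l.length <= k)]
    by_cases hz : l.getD k 0 = 0
    · have hgd : l[k] = 0 := by rwa [List.getD_eq_getElem l 0 h] at hz
      rw [if_pos hz, pvClearZeros_eq (l.eraseIdx k) k]
      have ht : (l.eraseIdx k).take k = l.take k := by
        rw [List.eraseIdx_eq_take_drop_succ, List.take_append]
        simp [List.length_take, Nat.min_eq_left (Nat.le_of_lt h)]
      have hdr : (l.eraseIdx k).drop k = l.drop (k + 1) := by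
        rw [List.eraseIdx_eq_take_drop_succ, List.drop_append]
        simp [List.length_take, Nat.min_eq_left (Nat.le_of_lt h)]
      rw [ht, hdr, hd]
      simp [hgd]
    · have hgd : l[k] ≠ 0 := by rwa [List.getD_eq_getElem l 0 h] at hz
      have hb : (l[k] != 0) = true := by simpa using hgd
      have ht : l.take (k + 1) = l.take k ++ [l[k]] := by
        rw [List.take_add_one, List.getElem?_eq_getElem h]; rfl
      rw [if_neg hz, pvClearZeros_eq l (k + 1), hd, List.filter_cons, hb, ht]
      simp only [List.append_assoc, List.singleton_append, if_true]
termination_by l.length - k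
decreasing_by
  · have hk : k < l.length := by omega
    simp only [List.length_eraseIdx, if_pos hk]; omega
  · omega

theorem pvClearZeros_zero (l : List Int) :
    pvClearZeros l 0 = l.filter (fun v => v != 0) := by
  simpa using pvClearZeros_eq l 0

-- ===== VERDICT (by name: the statement is the Claim_ definition above) =====
set_option maxHeartbeats 1000000 in
theorem getNumInSquare_spec : Claim_equal_getNumInSquare := by
  intro cb i j _ hpre
  unfold Spec_getNumInSquare getNumInSquare getNumInSquare_alt
  by_cases hin : 0 ≤ i ∧ i ≤ 8 ∧ 0 ≤ j ∧ j ≤ 8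
  · rw [if_pos hin]
    obtain ⟨hi0, hi8, hj0, hj8⟩ := hin
    have hfi : PySem.Int.floordiv i 3 = i / 3 := PySem.Int.floordiv_eq_ediv_of_pos (by norm_num)
    have hfj : PySem.Int.floordiv j 3 = j / 3 := PySem.Int.floordiv_eq_ediv_of_pos (by norm_num)
    rw [hfi, hfj]
    have e0 : PySem.List.pyRange 0 3 1 = [0, 1, 2] := by decide
    have e3 : PySem.List.pyRange 3 6 1 = [3, 4, 5] := by decide
    have e6 : PySem.List.pyRange 6 9 1 = [6, 7, 8] := by decide
    have hi' : i / 3 = 0 ∧ (0 ≤ i ∧ i ≤ 2) ∨ i / 3 = 1 ∧ (3 ≤ i ∧ i ≤ 5) ∨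
        i / 3 = 2 ∧ (6 ≤ i ∧ i ≤ 8) := by omega
    have hj' : j / 3 = 0 ∧ (0 ≤ j ∧ j ≤ 2) ∨ j / 3 = 1 ∧ (3 ≤ j ∧ j ≤ 5) ∨
        j / 3 = 2 ∧ (6 ≤ j ∧ j ≤ 8) := by omega
    rcases hi' with ⟨hq, h1, h2⟩ | ⟨hq, h1, h2⟩ | ⟨hq, h1, h2⟩ <;>
      rcases hj' with ⟨hq', h1', h2'⟩ | ⟨hq', h1', h2'⟩ | ⟨hq', h1', h2'⟩
    · rw [if_pos (show 0 ≤ i ∧ i ≤ 2 ∧ 0 ≤ j ∧ j ≤ 2 by omega), hq, hq']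
      norm_num only
      rw [pvClearZeros_zero, e0]
      simp [pvRowSlice, List.filter_append, List.append_assoc]
    · rw [if_neg (show ¬(0 ≤ i ∧ i ≤ 2 ∧ 0 ≤ j ∧ j ≤ 2) by omega), if_pos (show 0 ≤ i ∧ i ≤ 2 ∧ 3 ≤ j ∧ j ≤ 5 by omega), hq, hq']
      norm_num only
      rw [pvClearZeros_zero, e0]
      simp [pvRowSlice, List.filter_append, List.append_assoc]
    · rw [if_neg (show ¬(0 ≤ i ∧ i ≤ 2 ∧ 0 ≤ j ∧ j ≤ 2) by omega), if_neg (show ¬(0 ≤ i ∧ i ≤ 2 ∧ 3 ≤ j ∧ j ≤ 5) by omega), if_pos (show 0 ≤ i ∧ i ≤ 2 ∧ 6 ≤ j ∧ j ≤ 8 by omega), hq, hq']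
      norm_num only
      rw [pvClearZeros_zero, e0]
      simp [pvRowSlice, List.filter_append, List.append_assoc]
    · rw [if_neg (show ¬(0 ≤ i ∧ i ≤ 2 ∧ 0 ≤ j ∧ j ≤ 2) by omega), if_neg (show ¬(0 ≤ i ∧ i ≤ 2 ∧ 3 ≤ j ∧ j ≤ 5) by omega), if_neg (show ¬(0 ≤ i ∧ i ≤ 2 ∧ 6 ≤ j ∧ j ≤ 8) by omega), if_pos (show 3 ≤ i ∧ i ≤ 5 ∧ 0 ≤ j ∧ j ≤ 2 by omega), hq, hq']
      norm_num only
      rw [pvClearZeros_zero, e3]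
      simp [pvRowSlice, List.filter_append, List.append_assoc]
    · rw [if_neg (show ¬(0 ≤ i ∧ i ≤ 2 ∧ 0 ≤ j ∧ j ≤ 2) by omega), if_neg (show ¬(0 ≤ i ∧ i ≤ 2 ∧ 3 ≤ j ∧ j ≤ 5) by omega), if_neg (show ¬(0 ≤ i ∧ i ≤ 2 ∧ 6 ≤ j ∧ j ≤ 8) by omega), if_neg (show ¬(3 ≤ i ∧ i ≤ 5 ∧ 0 ≤ j ∧ j ≤ 2) by omega), if_pos (show 3 ≤ i ∧ i ≤ 5 ∧ 3 ≤ j ∧ j ≤ 5 by omega), hq, hq']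
      norm_num only
      rw [pvClearZeros_zero, e3]
      simp [pvRowSlice, List.filter_append, List.append_assoc]
    · rw [if_neg (show ¬(0 ≤ i ∧ i ≤ 2 ∧ 0 ≤ j ∧ j ≤ 2) by omega), if_neg (show ¬(0 ≤ i ∧ i ≤ 2 ∧ 3 ≤ j ∧ j ≤ 5) by omega), if_neg (show ¬(0 ≤ i ∧ i ≤ 2 ∧ 6 ≤ j ∧ j ≤ 8) by omega), if_neg (show ¬(3 ≤ i ∧ i ≤ 5 ∧ 0 ≤ j ∧ j ≤ 2) by omega), if_neg (show ¬(3 ≤ i ∧ i ≤ 5 ∧ 3 ≤ j ∧ j ≤ 5) by omega), if_pos (show 3 ≤ i ∧ i ≤ 5 ∧ 6 ≤ j ∧ j ≤ 8 by omega), hq, hq']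
      norm_num only
      rw [pvClearZeros_zero, e3]
      simp [pvRowSlice, List.filter_append, List.append_assoc]
    · rw [if_neg (show ¬(0 ≤ i ∧ i ≤ 2 ∧ 0 ≤ j ∧ j ≤ 2) by omega), if_neg (show ¬(0 ≤ i ∧ i ≤ 2 ∧ 3 ≤ j ∧ j ≤ 5) by omega), if_neg (show ¬(0 ≤ i ∧ i ≤ 2 ∧ 6 ≤ j ∧ j ≤ 8) by omega), if_neg (show ¬(3 ≤ i ∧ i ≤ 5 ∧ 0 ≤ j ∧ j ≤ 2) by omega), if_neg (show ¬(3 ≤ i ∧ i ≤ 5 ∧ 3 ≤ j ∧ j ≤ 5) by omega), if_neg (show ¬(3 ≤ i ∧ i ≤ 5 ∧ 6 ≤ j ∧ j ≤ 8) by omega), if_pos (show 6 ≤ i ∧ i ≤ 8 ∧ 0 ≤ j ∧ j ≤ 2 by omega), hq, hq']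
      norm_num only
      rw [pvClearZeros_zero, e6]
      simp [pvRowSlice, List.filter_append, List.append_assoc]
    · rw [if_neg (show ¬(0 ≤ i ∧ i ≤ 2 ∧ 0 ≤ j ∧ j ≤ 2) by omega), if_neg (show ¬(0 ≤ i ∧ i ≤ 2 ∧ 3 ≤ j ∧ j ≤ 5) by omega), if_neg (show ¬(0 ≤ i ∧ i ≤ 2 ∧ 6 ≤ j ∧ j ≤ 8) by omega), if_neg (show ¬(3 ≤ i ∧ i ≤ 5 ∧ 0 ≤ j ∧ j ≤ 2) by omega), if_neg (show ¬(3 ≤ i ∧ i ≤ 5 ∧ 3 ≤ j ∧ j ≤ 5) by omega), if_neg (show ¬(3 ≤ i ∧ i ≤ 5 ∧ 6 ≤ j ∧ j ≤ 8) by omega), if_neg (show ¬(6 ≤ i ∧ i ≤ 8 ∧ 0 ≤ j ∧ j ≤ 2) by omega), if_pos (show 6 ≤ i ∧ i ≤ 8 ∧ 3 ≤ j ∧ j ≤ 5 by omega), hq, hq']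
      norm_num only
      rw [pvClearZeros_zero, e6]
      simp [pvRowSlice, List.filter_append, List.append_assoc]
    · rw [if_neg (show ¬(0 ≤ i ∧ i ≤ 2 ∧ 0 ≤ j ∧ j ≤ 2) by omega), if_neg (show ¬(0 ≤ i ∧ i ≤ 2 ∧ 3 ≤ j ∧ j ≤ 5) by omega), if_neg (show ¬(0 ≤ i ∧ i ≤ 2 ∧ 6 ≤ j ∧ j ≤ 8) by omega), if_neg (show ¬(3 ≤ i ∧ i ≤ 5 ∧ 0 ≤ j ∧ j ≤ 2) by omega), if_neg (show ¬(3 ≤ i ∧ i ≤ 5 ∧ 3 ≤ j ∧ j ≤ 5) by omega), if_neg (show ¬(3 ≤ i ∧ i ≤ 5 ∧ 6 ≤ j ∧ j ≤ 8) by omega), if_neg (show ¬(6 ≤ i ∧ i ≤ 8 ∧ 0 ≤ j ∧ j ≤ 2) by omega), if_neg (show ¬(6 ≤ i ∧ i ≤ 8 ∧ 3 ≤ j ∧ j ≤ 5) by omega), if_pos (show 6 ≤ i ∧ i ≤ 8 ∧ 6 ≤ j ∧ j ≤ 8 by omega), hq, hq']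
      norm_num only
      rw [pvClearZeros_zero, e6]
      simp [pvRowSlice, List.filter_append, List.append_assoc]
  · rw [if_neg hin]
    split_ifs <;> first | omega | (rw [pvClearZeros_zero]; rfl)
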